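-- pv_equiv track=rewrite | github.com/calmdown13/dazed | src/dazed/confusion_matrix.py | _create_info_lists
-- ===== SOURCE A (Python) =====
-- from typing import (
--     Any,
--     Callable,
--     Dict,
--     List,
--     Optional,
--     Tuple,
--     Type,
--     TypeVar,
--     Union,
-- )
--
-- T = TypeVar("T")
--
-- Label = Union[int, str]
--
-- SparseValues = Union[List[Label], List[List[Label]]]
--
-- def _init_list_array(size1: int, size2: int, val_type: T) -> List[List[T]]:
--     lists: List[Any] = []
--     for i in range(size1):
--         lists.append([])
--         for _ in range(size2):
--             lists[i].append(val_type())
--     return lists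
--
-- def _create_info_lists(
--     y1: SparseValues,
--     y2: SparseValues,
--     info: List[T],
--     label_to_index: Dict[Label, int],
-- ) -> List[List[T]]:
--     info_lists = _init_list_array(len(label_to_index), len(label_to_index), list)
--     for y1_i, y2_i, info_i in zip(y1, y2, info):
--         info_lists[label_to_index[y1_i]][label_to_index[y2_i]].append(info_i)
--     return info_lists
-- ===== SOURCE B (Python) =====
-- def _create_info_lists(y1, y2, info, label_to_index):
--     triples = list(zip(y1, y2, info))
--     n = len(label_to_index)
--     return [[[info_i for a, b, info_i in triples
--               if label_to_index[a] == i and label_to_index[b] == j]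
--              for j in range(n)]
--             for i in range(n)]
-- ===== Notes on version B (the rewrite author's own statement) =====
-- stated objective: alternative
-- what changed: B drops A's preallocated matrix mutated in place by a single distributing pass and instead materializes the zipped triples once and computes every cell independently by a per-cell brute-force filter over those triples inside a nested comprehension (no mutation, trades an O(n^2*m) scan cost for independence of cells).
-- outside the precondition, e.g. on _create_info_lists(['a'], ['a'], ['x'], {'a': -1}): A returns [[['x']]], B returns [[[]]]
import Mathlib
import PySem

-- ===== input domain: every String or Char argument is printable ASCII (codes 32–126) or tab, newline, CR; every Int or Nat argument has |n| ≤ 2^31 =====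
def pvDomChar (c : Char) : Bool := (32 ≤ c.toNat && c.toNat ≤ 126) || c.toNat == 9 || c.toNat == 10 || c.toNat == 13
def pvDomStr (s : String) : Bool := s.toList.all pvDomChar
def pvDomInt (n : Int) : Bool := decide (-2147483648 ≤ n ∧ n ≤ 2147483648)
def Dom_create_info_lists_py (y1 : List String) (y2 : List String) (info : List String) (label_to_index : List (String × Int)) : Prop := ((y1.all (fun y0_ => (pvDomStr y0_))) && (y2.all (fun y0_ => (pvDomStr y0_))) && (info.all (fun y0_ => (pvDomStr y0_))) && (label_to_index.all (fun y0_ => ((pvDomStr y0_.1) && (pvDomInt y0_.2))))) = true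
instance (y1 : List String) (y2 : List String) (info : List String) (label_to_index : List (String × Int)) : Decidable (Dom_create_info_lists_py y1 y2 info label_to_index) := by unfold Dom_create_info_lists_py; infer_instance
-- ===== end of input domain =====

-- B replaces A's single distributing pass into a preallocated mutated N×N matrix by a nested
-- comprehension that computes each cell independently with a brute-force filter over the zipped
-- triples (alternative: no mutation, cells independent; not faster).

-- ===== PORT A =====
-- Python list update l[i] = … / l[i].append(…) with Python's negative-index wrap;
-- out-of-range indices (on which Python raises IndexError) leave the list unchanged — excluded by Pre_.
def pyUpd {α : Type} (xs : List α) (i : Int) (f : α → α) : List α :=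
  let j := if i < 0 then i + xs.length else i
  if 0 ≤ j then xs.modify j.toNat f else xs

-- _init_list_array(size1, size2, list): rows appended one by one, each row filled with fresh empty lists
def pvInitListArray (size1 size2 : Int) : List (List (List String)) :=
  (PySem.List.pyRange 0 size1 1).foldl
    (fun lists _ =>
      lists ++ [(PySem.List.pyRange 0 size2 1).foldl (fun row _ => row ++ [([] : List String)]) []])
    []

def create_info_lists_py (y1 : List String) (y2 : List String) (info : List String) (label_to_index : List (String × Int)) : List (List (List String)) :=
  let d : PySem.Dict String Int := PySem.Dict.mk label_to_index
  (y1.zip (y2.zip info)).foldl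
    (fun m t =>
      match d.get? t.1, d.get? t.2.1 with
      | some i, some j => pyUpd m i (fun row => pyUpd row j (fun cell => cell ++ [t.2.2]))
      | _, _ => m)
    (pvInitListArray (label_to_index.length : Int) (label_to_index.length : Int))

-- ===== PORT B =====
-- per-cell membership test 'label_to_index[a] == i and label_to_index[b] == j' (KeyError — a missing
-- label — is excluded by Pre_, so the none branches are unreachable inside the claim)
def create_info_lists_py_alt (y1 : List String) (y2 : List String) (info : List String) (label_to_index : List (String × Int)) : List (List (List String)) :=
  let d : PySem.Dict String Int := PySem.Dict.mk label_to_index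
  let triples := y1.zip (y2.zip info)
  let n : Int := (label_to_index.length : Int)
  (PySem.List.pyRange 0 n 1).map (fun i =>
    (PySem.List.pyRange 0 n 1).map (fun j =>
      (triples.filter (fun t => d.get? t.1 == some i && d.get? t.2.1 == some j)).map (·.2.2)))

-- ===== PRECONDITION & SPEC =====
-- first-match lookup of a label, with its value required to be a valid 0-based row/column index
def pvOkLabel (label_to_index : List (String × Int)) (x : String) : Bool :=
  match (PySem.Dict.mk label_to_index).get? x with
  | some v => decide (0 ≤ v ∧ v < (label_to_index.length : Int))
  | none => false

-- Pre_ restricts to the natural domain of an index map: every label used by a zipped triple maps to a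
-- valid index 0 ≤ v < N (a missing label raises KeyError, v ≥ N or v < -N raises IndexError, and
-- -N ≤ v < 0 is negative-index wraparound outside the purpose of a label-to-index map).
def Pre_create_info_lists_py (y1 : List String) (y2 : List String) (info : List String) (label_to_index : List (String × Int)) : Prop :=
  ((y1.zip (y2.zip info)).all (fun t => pvOkLabel label_to_index t.1 && pvOkLabel label_to_index t.2.1)) = true
instance (y1 : List String) (y2 : List String) (info : List String) (label_to_index : List (String × Int)) : Decidable (Pre_create_info_lists_py y1 y2 info label_to_index) := by unfold Pre_create_info_lists_py; infer_instance

def pvWitness_create_info_lists_py : List String × List String × List String × (List (String × Int)) :=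
  (["a", "b"], ["b", "b"], ["x", "y"], [("a", 0), ("b", 1)])

def Spec_create_info_lists_py (y1 : List String) (y2 : List String) (info : List String) (label_to_index : List (String × Int)) (out : List (List (List String))) : Prop := out = create_info_lists_py_alt y1 y2 info label_to_index
instance (y1 : List String) (y2 : List String) (info : List String) (label_to_index : List (String × Int)) (out : List (List (List String))) : Decidable (Spec_create_info_lists_py y1 y2 info label_to_index out) := by unfold Spec_create_info_lists_py; infer_instance

-- ===== CLAIM (what is proved, stated in full; the proofs are below) =====
def Claim_equal_create_info_lists_py : Prop := ∀ (y1 : List String) (y2 : List String) (info : List String) (label_to_index : List (String × Int)), Dom_create_info_lists_py y1 y2 info label_to_index → Pre_create_info_lists_py y1 y2 info label_to_index → Spec_create_info_lists_py y1 y2 info label_to_index (create_info_lists_py y1 y2 info label_to_index)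

-- ===== LEMMAS AND PROOFS =====

-- the successfully looked-up ((row, col), info) pairs, in order
def pvPairs (d : PySem.Dict String Int) (ts : List (String × String × String)) : List ((Int × Int) × String) :=
  ts.filterMap (fun t =>
    match d.get? t.1, d.get? t.2.1 with
    | some i, some j => some ((i, j), t.2.2)
    | _, _ => none)

-- the common characterisation: cell (i, j) holds the infos of the pairs keyed (i, j), in order
def pvTarget (n : Int) (P : List ((Int × Int) × String)) : List (List (List String)) :=
  (PySem.List.pyRange 0 n 1).map (fun i =>
    (PySem.List.pyRange 0 n 1).map (fun j =>
      (P.filter (fun p => p.1 == (i, j))).map (·.2)))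

theorem foldl_match_eq_foldl_pvPairs {β : Type} (d : PySem.Dict String Int)
    (ts : List (String × String × String)) (g : β → ((Int × Int) × String) → β) (init : β) :
    ts.foldl
      (fun b t =>
        match d.get? t.1, d.get? t.2.1 with
        | some i, some j => g b ((i, j), t.2.2)
        | _, _ => b)
      init
    = (pvPairs d ts).foldl g init := by
  induction ts generalizing init with
  | nil => rfl
  | cons t ts ih =>
    simp only [pvPairs, List.filterMap_cons, List.foldl_cons] at *
    cases h1 : d.get? t.1 <;> cases h2 : d.get? t.2.1 <;> simp [ih]

-- B's per-cell filter over the triples selects exactly the pairs keyed (i, j)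
theorem filter_cell_eq_pvPairs_filter (d : PySem.Dict String Int)
    (ts : List (String × String × String)) (i j : Int) :
    (ts.filter (fun t => d.get? t.1 == some i && d.get? t.2.1 == some j)).map (·.2.2)
    = ((pvPairs d ts).filter (fun p => p.1 == (i, j))).map (·.2) := by
  induction ts with
  | nil => rfl
  | cons t ts ih =>
    simp only [pvPairs, List.filterMap_cons, List.filter_cons] at *
    cases h1 : d.get? t.1 <;> cases h2 : d.get? t.2.1
    · simp [ih]
    · simp [ih]
    · simp [ih]
    · rename_i a b
      by_cases hi : a = i <;> by_cases hj : b = j <;>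
        simp [hi, hj, ih, Prod.ext_iff]

theorem pyUpd_map_pyRange {α : Type} (n i : Int) (hi : 0 ≤ i) (_hn : i < n)
    (f : Int → α) (g : α → α) :
    pyUpd ((PySem.List.pyRange 0 n 1).map f) i g
    = (PySem.List.pyRange 0 n 1).map (fun k => if k = i then g (f k) else f k) := by
  simp only [pyUpd]
  rw [if_neg (show ¬ i < 0 by omega), if_pos hi]
  apply List.ext_getElem
  · simp
  · intro k h1 h2
    have hk : k < (n - 0).toNat := by simpa [PySem.List.length_pyRange_one] using h2
    simp only [List.getElem_modify, List.getElem_map, PySem.List.getElem_pyRange_one]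
    have : (i.toNat = k) ↔ ((0 : Int) + (k : Int) = i) := by omega
    split_ifs with ha hb hb <;> simp_all

theorem foldl_pyUpd_target (n : Int) (P Q : List ((Int × Int) × String))
    (hP : ∀ p ∈ P, 0 ≤ p.1.1 ∧ p.1.1 < n ∧ 0 ≤ p.1.2 ∧ p.1.2 < n) :
    P.foldl (fun m p => pyUpd m p.1.1 (fun row => pyUpd row p.1.2 (fun cell => cell ++ [p.2])))
      (pvTarget n Q)
    = pvTarget n (Q ++ P) := by
  induction P generalizing Q with
  | nil => simp
  | cons p P ih =>
    obtain ⟨h1, h2, h3, h4⟩ := hP p (List.mem_cons_self ..)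
    have hstep :
        pyUpd (pvTarget n Q) p.1.1 (fun row => pyUpd row p.1.2 (fun cell => cell ++ [p.2]))
        = pvTarget n (Q ++ [p]) := by
      unfold pvTarget
      rw [pyUpd_map_pyRange n p.1.1 h1 h2]
      apply List.map_congr_left
      intro i hi
      by_cases hii : i = p.1.1
      · rw [if_pos hii]
        rw [pyUpd_map_pyRange n p.1.2 h3 h4]
        apply List.map_congr_left
        intro j hj
        by_cases hjj : j = p.1.2
        · rw [if_pos hjj]
          simp [List.filter_append, hii, hjj]
        · rw [if_neg hjj]
          have : (p.1 == (i, j)) = false := by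
            simp only [beq_eq_false_iff_ne, ne_eq]
            intro h; apply hjj; rw [h]
          simp [List.filter_append, this]
      · rw [if_neg hii]
        apply List.map_congr_left
        intro j hj
        have : (p.1 == (i, j)) = false := by
          simp only [beq_eq_false_iff_ne, ne_eq]
          intro h; apply hii; rw [h]
        simp [List.filter_append, this]
    rw [List.foldl_cons, hstep, ih (Q ++ [p]) (fun q hq => hP q (List.mem_cons_of_mem _ hq))]
    simp

theorem init_eq_target (n : Int) : pvInitListArray n n = pvTarget n [] := by
  unfold pvInitListArray pvTarget
  rw [PySem.List.foldl_append_singleton_eq_map (fun _ => (PySem.List.pyRange 0 n 1).foldl (fun row _ => row ++ [([] : List String)]) [])]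
  rw [PySem.List.foldl_append_singleton_eq_map (fun _ => ([] : List String))]
  simp

theorem mem_pvPairs_bounds (label_to_index : List (String × Int))
    (ts : List (String × String × String))
    (hok : (ts.all (fun t => pvOkLabel label_to_index t.1 && pvOkLabel label_to_index t.2.1)) = true)
    (p : (Int × Int) × String) (hp : p ∈ pvPairs (PySem.Dict.mk label_to_index) ts) :
    0 ≤ p.1.1 ∧ p.1.1 < (label_to_index.length : Int) ∧
    0 ≤ p.1.2 ∧ p.1.2 < (label_to_index.length : Int) := by
  unfold pvPairs at hp
  rw [List.mem_filterMap] at hp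
  obtain ⟨t, ht, hmatch⟩ := hp
  rw [List.all_eq_true] at hok
  have h := hok t ht
  rw [Bool.and_eq_true] at h
  obtain ⟨ha, hb⟩ := h
  unfold pvOkLabel at ha hb
  cases h1 : (PySem.Dict.mk label_to_index).get? t.1 <;> rw [h1] at ha hmatch
  · exact absurd ha (by simp)
  cases h2 : (PySem.Dict.mk label_to_index).get? t.2.1 <;> rw [h2] at hb hmatch
  · exact absurd hb (by simp)
  simp only [decide_eq_true_eq] at ha hb
  obtain ⟨rfl⟩ : p = ((_, _), t.2.2) := by simpa using hmatch.symm
  exact ⟨ha.1, ha.2, hb.1, hb.2⟩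

-- ===== VERDICT (by name: the statement is the Claim_ definition above) =====
theorem create_info_lists_py_spec : Claim_equal_create_info_lists_py := by
  intro y1 y2 info ltoi _ hpre
  unfold Spec_create_info_lists_py create_info_lists_py create_info_lists_py_alt
  have hok := hpre
  set d : PySem.Dict String Int := PySem.Dict.mk ltoi with hd
  set ts := y1.zip (y2.zip info) with hts
  set n : Int := (ltoi.length : Int) with hn
  -- A's fold equals pvTarget over the looked-up pairs
  have hA :
      ts.foldl
        (fun m t =>
          match d.get? t.1, d.get? t.2.1 with
          | some i, some j => pyUpd m i (fun row => pyUpd row j (fun cell => cell ++ [t.2.2]))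
          | _, _ => m)
        (pvInitListArray n n)
      = pvTarget n (pvPairs d ts) := by
    rw [foldl_match_eq_foldl_pvPairs d ts
      (fun m p => pyUpd m p.1.1 (fun row => pyUpd row p.1.2 (fun cell => cell ++ [p.2])))]
    rw [init_eq_target]
    rw [foldl_pyUpd_target n (pvPairs d ts) []
      (fun p hp => mem_pvPairs_bounds ltoi ts hok p hp)]
    simp
  -- B's per-cell filters yield the same pvTarget
  have hB :
      (PySem.List.pyRange 0 n 1).map (fun i =>
        (PySem.List.pyRange 0 n 1).map (fun j =>
          (ts.filter (fun t => d.get? t.1 == some i && d.get? t.2.1 == some j)).map (·.2.2)))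
      = pvTarget n (pvPairs d ts) := by
    unfold pvTarget
    apply List.map_congr_left
    intro i _
    apply List.map_congr_left
    intro j _
    exact filter_cell_eq_pvPairs_filter d ts i j
  simp only at hA hB ⊢
  rw [hA, hB]
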